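-- pv_equiv track=rewrite | github.com/neo-claw/dashboard | trinity/experiments/taxonomy_editor/parse_inbound.py | fill_forward
-- ===== SOURCE A (Python) =====
-- def fill_forward(matrix):
--     """Forward-fill blanks in each column to replace empty inherited cells."""
--     if not matrix:
--         return matrix
--     n_cols = len(matrix[0])
--     last = [None] * n_cols
--     for row in matrix:
--         # Ensure row has n_cols entries
--         if len(row) < n_cols:
--             row.extend([''] * (n_cols - len(row)))
--         for i in range(n_cols):
--             cell = row[i].strip()
--             if cell != '':
--                 last[i] = row[i]
--             else:
--                 if last[i] is not None:
--                     row[i] = last[i]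
--                 else:
--                     row[i] = ''
--     return matrix
-- ===== SOURCE B (Python) =====
-- def fill_forward(matrix):
--     """Forward-fill blanks in each column to replace empty inherited cells."""
--     if not matrix:
--         return matrix
--     n_cols = len(matrix[0])
--     # pass 1: pad every short row to n_cols
--     for row in matrix:
--         if len(row) < n_cols:
--             row.extend([''] * (n_cols - len(row)))
--     # pass 2: columns outer, rows inner; one scalar 'last' per column
--     for i in range(n_cols):
--         last = None
--         for row in matrix:
--             if row[i].strip() != '':
--                 last = row[i]
--             else:
--                 row[i] = last if last is not None else ''
--     return matrix
-- ===== Notes on version B (the rewrite author's own statement) =====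
-- stated objective: alternative
-- what changed: Splits A's single interleaved row pass (padding + per-row update of a vector of n_cols 'last' values) into two passes: one padding pass, then a column-outer/row-inner traversal that keeps only one scalar 'last' per column.
import Mathlib
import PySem

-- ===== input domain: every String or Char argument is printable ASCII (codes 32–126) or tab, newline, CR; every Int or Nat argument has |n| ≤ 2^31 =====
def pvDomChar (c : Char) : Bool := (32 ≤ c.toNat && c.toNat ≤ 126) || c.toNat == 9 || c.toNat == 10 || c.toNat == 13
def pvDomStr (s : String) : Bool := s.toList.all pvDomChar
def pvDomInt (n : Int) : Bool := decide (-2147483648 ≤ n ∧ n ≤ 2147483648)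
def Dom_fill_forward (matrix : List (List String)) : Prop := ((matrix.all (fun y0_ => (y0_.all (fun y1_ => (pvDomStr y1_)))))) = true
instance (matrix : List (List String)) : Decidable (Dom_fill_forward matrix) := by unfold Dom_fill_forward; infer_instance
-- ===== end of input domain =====

-- B splits A's single interleaved pass into a padding pass plus a column-outer
-- traversal with one scalar 'last' per column (objective: alternative decomposition).
-- Both Pythons mutate 'matrix' in place and return it; the equivalence proved here
-- is about the return value (the mutation is the same in both).

-- ===== PORT A =====
-- inner 'for i in range(n_cols)' loop of A; indices from range(n) are in [0,n),
-- always in range after padding, so plain Nat getD/set indexing is exact here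
def pvFillRowA (n : Nat) (row : List String) (last : List (Option String)) :
    List String × List (Option String) :=
  (List.range n).foldl
    (fun s i =>
      if PySem.Str.strip (s.1.getD i "") ≠ "" then
        (s.1, s.2.set i (some (s.1.getD i "")))
      else
        (s.1.set i ((s.2.getD i none).getD ""), s.2))
    (row, last)

-- outer 'for row in matrix' loop of A, threading the 'last' vector
def pvLoopA (n : Nat) : List (List String) → List (Option String) → List (List String)
  | [], _ => []
  | row :: rest, last =>
      let row1 := if row.length < n then row ++ List.replicate (n - row.length) "" else row
      let p := pvFillRowA n row1 last
      p.1 :: pvLoopA n rest p.2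

def fill_forward (matrix : List (List String)) : List (List String) :=
  match matrix with
  | [] => []
  | r0 :: _ => pvLoopA r0.length matrix (List.replicate r0.length none)

-- ===== PORT B =====
-- pass 1 of B: pad every short row to n columns
def pvPadAll (n : Nat) (matrix : List (List String)) : List (List String) :=
  matrix.map (fun row => if row.length < n then row ++ List.replicate (n - row.length) "" else row)

-- inner 'for row in matrix' loop of B for one column i, with its scalar 'last'
-- (indices from range(n) are in [0,n), always in range after the padding pass,
-- so plain Nat getD/set indexing is exact here)
def pvColPass (i : Nat) (last : Option String) : List (List String) → List (List String)
  | [] => []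
  | row :: rest =>
      if PySem.Str.strip (row.getD i "") ≠ "" then
        row :: pvColPass i (some (row.getD i "")) rest
      else
        row.set i (last.getD "") :: pvColPass i last rest

def fill_forward_alt (matrix : List (List String)) : List (List String) :=
  match matrix with
  | [] => []
  | r0 :: _ =>
      (List.range r0.length).foldl (fun m i => pvColPass i none m)
        (pvPadAll r0.length matrix)

-- ===== PRECONDITION & SPEC =====
def Spec_fill_forward (matrix : List (List String)) (out : List (List String)) : Prop := out = fill_forward_alt matrix
instance (matrix : List (List String)) (out : List (List String)) : Decidable (Spec_fill_forward matrix out) := by unfold Spec_fill_forward; infer_instance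

-- ===== CLAIM (what is proved, stated in full; the proofs are below) =====
def Claim_equal_fill_forward : Prop := ∀ (matrix : List (List String)), Dom_fill_forward matrix → Spec_fill_forward matrix (fill_forward matrix)

-- ===== LEMMAS AND PROOFS =====

-- 1-D forward fill of one column, the common semantics both ports reduce to
def pvFfCol (last : Option String) : List String → List String
  | [] => []
  | c :: cs =>
      if PySem.Str.strip c ≠ "" then c :: pvFfCol (some c) cs
      else last.getD "" :: pvFfCol last cs

lemma pvPadAll_len (n : Nat) (m : List (List String)) :
    ∀ r ∈ pvPadAll n m, n ≤ r.length := by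
  intro r hr
  simp only [pvPadAll, List.mem_map] at hr
  obtain ⟨row, -, rfl⟩ := hr
  by_cases h : row.length < n
  · rw [if_pos h]; simp only [List.length_append, List.length_replicate]; omega
  · rw [if_neg h]; omega

lemma pvLoopA_pad (n : Nat) (m : List (List String)) (last : List (Option String)) :
    pvLoopA n m last = pvLoopA n (pvPadAll n m) last := by
  induction m generalizing last with
  | nil => rfl
  | cons row rest ih =>
      simp only [pvPadAll, List.map_cons, pvLoopA]
      have h1 : (if (if row.length < n then row ++ List.replicate (n - row.length) "" else row).length < n
          then (if row.length < n then row ++ List.replicate (n - row.length) "" else row) ++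
            List.replicate (n - (if row.length < n then row ++ List.replicate (n - row.length) "" else row).length) ""
          else (if row.length < n then row ++ List.replicate (n - row.length) "" else row))
          = (if row.length < n then row ++ List.replicate (n - row.length) "" else row) := by
        by_cases h : row.length < n
        · rw [if_pos h, if_neg (by simp only [List.length_append, List.length_replicate]; omega)]
        · rw [if_neg h, if_neg (by omega)]
      rw [h1, ih]
      rfl

-- A's inner loop preserves the length of the 'last' vector
lemma pvFillRowA_len_aux (is : List Nat) :
    ∀ (s : List String × List (Option String)),
    ((List.foldl
      (fun (s : List String × List (Option String)) i =>
        if PySem.Str.strip (s.1.getD i "") ≠ "" then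
          (s.1, s.2.set i (some (s.1.getD i "")))
        else
          (s.1.set i ((s.2.getD i none).getD ""), s.2)) s is).2).length = s.2.length := by
  induction is with
  | nil => intro s; rfl
  | cons i is ih =>
      intro s
      rw [List.foldl_cons]
      split
      · rw [ih]; exact List.length_set ..
      · rw [ih]

lemma pvFillRowA_len (n : Nat) (row : List String) (last : List (Option String)) :
    (pvFillRowA n row last).2.length = last.length :=
  pvFillRowA_len_aux (List.range n) (row, last)

-- A's inner loop at shifted indices factors through the tails
lemma pvFillRowA_shift (is : List Nat) :
    ∀ (cs : List String) (ls : List (Option String)) (c : String) (l : Option String),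
    List.foldl
      (fun (s : List String × List (Option String)) i =>
        if PySem.Str.strip (s.1.getD (i+1) "") ≠ "" then
          (s.1, s.2.set (i+1) (some (s.1.getD (i+1) "")))
        else
          (s.1.set (i+1) ((s.2.getD (i+1) none).getD ""), s.2))
      (c :: cs, l :: ls) is
    = (c :: (List.foldl
        (fun (s : List String × List (Option String)) i =>
          if PySem.Str.strip (s.1.getD i "") ≠ "" then
            (s.1, s.2.set i (some (s.1.getD i "")))
          else
            (s.1.set i ((s.2.getD i none).getD ""), s.2)) (cs, ls) is).1,
       l :: (List.foldl
        (fun (s : List String × List (Option String)) i =>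
          if PySem.Str.strip (s.1.getD i "") ≠ "" then
            (s.1, s.2.set i (some (s.1.getD i "")))
          else
            (s.1.set i ((s.2.getD i none).getD ""), s.2)) (cs, ls) is).2) := by
  induction is with
  | nil => intro cs ls c l; rfl
  | cons i is ih =>
      intro cs ls c l
      simp only [List.foldl_cons, List.getD_cons_succ, List.set_cons_succ]
      split <;> exact ih _ _ _ _

lemma pvFillRowA_succ (n : Nat) (c : String) (cs : List String)
    (l : Option String) (ls : List (Option String)) :
    pvFillRowA (n+1) (c :: cs) (l :: ls)
    = if PySem.Str.strip c ≠ "" then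
        (c :: (pvFillRowA n cs ls).1, some c :: (pvFillRowA n cs ls).2)
      else
        (l.getD "" :: (pvFillRowA n cs ls).1, l :: (pvFillRowA n cs ls).2) := by
  simp only [pvFillRowA, List.range_succ_eq_map, List.foldl_cons, List.foldl_map,
    Nat.succ_eq_add_one]
  simp only [List.getD_cons_zero, List.set_cons_zero]
  split
  · exact pvFillRowA_shift _ _ _ _ _
  · exact pvFillRowA_shift _ _ _ _ _

-- A's outer loop, one column at a time
lemma pvLoopA_dec (rows : List (List String)) :
    ∀ (n : Nat) (l : Option String) (ls : List (Option String)), ls.length = n →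
    (∀ r ∈ rows, n + 1 ≤ r.length) →
    pvLoopA (n+1) rows (l :: ls)
    = List.zipWith (· :: ·) (pvFfCol l (rows.map (·.headD "")))
        (pvLoopA n (rows.map (·.tail)) ls) := by
  induction rows with
  | nil => intro n l ls _ _; rfl
  | cons row rest ih =>
      intro n l ls hlen hrows
      have hr : n + 1 ≤ row.length := hrows row (by simp)
      obtain ⟨c, cs, rfl⟩ : ∃ c cs, row = c :: cs := by
        cases row with
        | nil => simp at hr
        | cons c cs => exact ⟨c, cs, rfl⟩
      have hcs : ¬ cs.length < n := by simp only [List.length_cons] at hr; omega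
      have hq : (pvFillRowA n cs ls).2.length = n := by rw [pvFillRowA_len]; exact hlen
      have hrest : ∀ r ∈ rest, n + 1 ≤ r.length := fun r hrm => hrows r (by simp [hrm])
      have htl : pvLoopA n (cs :: rest.map (·.tail)) ls
          = (pvFillRowA n cs ls).1 :: pvLoopA n (rest.map (·.tail)) (pvFillRowA n cs ls).2 := by
        simp only [pvLoopA, if_neg hcs]
      simp only [pvLoopA, if_neg (show ¬ (c :: cs).length < n + 1 by omega), pvFillRowA_succ,
        List.map_cons, List.headD_cons, List.tail_cons, pvFfCol, htl]
      split
      · rw [List.zipWith_cons_cons, ih n (some c) (pvFillRowA n cs ls).2 hq hrest]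
      · rw [List.zipWith_cons_cons, ih n l (pvFillRowA n cs ls).2 hq hrest]

-- B's column pass at a shifted index factors through the tails
lemma pvColPass_shift (i : Nat) (l : Option String) :
    ∀ (H : List String) (T : List (List String)),
    pvColPass (i+1) l (List.zipWith (· :: ·) H T)
    = List.zipWith (· :: ·) H (pvColPass i l T) := by
  intro H
  induction H generalizing l with
  | nil => intro T; cases T <;> rfl
  | cons h H ih =>
      intro T
      cases T with
      | nil => rfl
      | cons t T =>
          simp only [List.zipWith_cons_cons, pvColPass, List.getD_cons_succ, List.set_cons_succ]
          split <;> simp [ih]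

lemma pvColPass_fold_shift (is : List Nat) :
    ∀ (H : List String) (T : List (List String)),
    List.foldl (fun m i => pvColPass (i+1) none m) (List.zipWith (· :: ·) H T) is
    = List.zipWith (· :: ·) H (List.foldl (fun m i => pvColPass i none m) T is) := by
  induction is with
  | nil => intro H T; rfl
  | cons i is ih =>
      intro H T
      simp only [List.foldl_cons, pvColPass_shift, ih]

-- B's column-0 pass is the 1-D forward fill of the heads
lemma pvColPass_zero (l : Option String) :
    ∀ (rows : List (List String)), (∀ r ∈ rows, r ≠ []) →
    pvColPass 0 l rows
    = List.zipWith (· :: ·) (pvFfCol l (rows.map (·.headD ""))) (rows.map (·.tail)) := by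
  intro rows
  induction rows generalizing l with
  | nil => intro _; rfl
  | cons row rest ih =>
      intro hne
      obtain ⟨c, cs, rfl⟩ : ∃ c cs, row = c :: cs := by
        cases row with
        | nil => exact absurd rfl (hne [] (by simp))
        | cons c cs => exact ⟨c, cs, rfl⟩
      simp only [pvColPass, List.map_cons, List.headD_cons, List.tail_cons, pvFfCol,
        List.getD_cons_zero, List.set_cons_zero]
      split <;> simp [ih _ (fun r hrm => hne r (by simp [hrm])), List.zipWith_cons_cons]

lemma pvLoopA_zero (rows : List (List String)) :
    pvLoopA 0 rows [] = rows := by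
  induction rows with
  | nil => rfl
  | cons row rest ih =>
      simp only [pvLoopA, pvFillRowA, List.range_zero, List.foldl_nil]
      rw [if_neg (by omega), ih]

-- main lemma: on rows already at least n wide, A's row loop equals B's column fold
lemma pvMain (n : Nat) :
    ∀ (rows : List (List String)), (∀ r ∈ rows, n ≤ r.length) →
    pvLoopA n rows (List.replicate n none)
    = List.foldl (fun m i => pvColPass i none m) rows (List.range n) := by
  induction n with
  | zero => intro rows _; simpa using pvLoopA_zero rows
  | succ n ih =>
      intro rows hrows
      have hne : ∀ r ∈ rows, r ≠ [] := by
        intro r hrm h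
        have := hrows r hrm; subst h; simp at this
      have htails : ∀ r ∈ rows.map (·.tail), n ≤ r.length := by
        intro r hrm
        simp only [List.mem_map] at hrm
        obtain ⟨row, hrow, rfl⟩ := hrm
        have := hrows row hrow
        cases row with
        | nil => simp at this
        | cons a t => simp only [List.length_cons] at this; simp only [List.tail_cons]; omega
      rw [List.replicate_succ,
        pvLoopA_dec rows n none (List.replicate n none) (by simp) hrows,
        ih (rows.map (·.tail)) htails,
        List.range_succ_eq_map, List.foldl_cons, List.foldl_map,
        pvColPass_zero none rows hne]
      simp only [Nat.succ_eq_add_one]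
      rw [pvColPass_fold_shift]

-- ===== VERDICT (by name: the statement is the Claim_ definition above) =====
theorem fill_forward_spec : Claim_equal_fill_forward := by
  intro matrix _
  unfold Spec_fill_forward
  cases matrix with
  | nil => rfl
  | cons r0 rest =>
      show pvLoopA r0.length (r0 :: rest) (List.replicate r0.length none)
        = List.foldl (fun m i => pvColPass i none m) (pvPadAll r0.length (r0 :: rest))
            (List.range r0.length)
      rw [pvLoopA_pad, pvMain _ _ (pvPadAll_len _ _)]
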